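-- pv_equiv track=rewrite | github.com/gogoalexy/neuromorphic-control-of-unmanned-vehicles-by-attractor-spiking-neural-networks | ssm.py | getTransition
-- ===== SOURCE A (Python) =====
-- def getTransition(bump_series0, bump_series1):
--     """Find the transitions between two series of bump durations. Assume no overlap of bump duration."""
--     transitions = []
--     diff, direction = None, None
--     for series0 in bump_series0:
--         start0, end0 = series0
--         for series1 in bump_series1:
--             start1, end1 = series1
--             if start0 > start1:
--                 direction = '-'
--                 diff = start0 - end1
--                 transition_point = start0
--             else:
--                 direction = '+'
--                 diff = start1 - end0
--                 transition_point = start1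
--             if diff < 3:
--                 transitions.append((transition_point, direction))
--     return transitions
-- ===== SOURCE B (Python) =====
-- def _drop_while(xs, pred):
--     k = 0
--     while k < len(xs) and pred(xs[k]):
--         k += 1
--     return xs[k:]
--
--
-- def _take_while(xs, pred):
--     k = 0
--     while k < len(xs) and pred(xs[k]):
--         k += 1
--     return xs[:k]
--
--
-- def getTransition(bump_series0, bump_series1):
--     """Sorted-window search: presort bump_series1 (with original positions) by start
--     and by end; for each series0 interval read the qualifying candidates off the
--     sorted lists, then restore original output order by sorting hits on position."""
--     indexed = list(enumerate(bump_series1))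
--     by_start = sorted(indexed, key=lambda t: t[1][0])
--     by_end = sorted(indexed, key=lambda t: t[1][1])
--     out = []
--     for start0, end0 in bump_series0:
--         # '-' hits need end1 > start0 - 3: a suffix of by_end; keep start1 < start0
--         tail = _drop_while(by_end, lambda t: t[1][1] <= start0 - 3)
--         hits = [(i, (start0, '-')) for i, (s1, _e1) in tail if s1 < start0]
--         # '+' hits need start1 in [start0, end0 + 3): a window of by_start
--         window = _take_while(_drop_while(by_start, lambda t: t[1][0] < start0),
--                              lambda t: t[1][0] - end0 < 3)
--         hits += [(i, (s1, '+')) for i, (s1, _e1) in window]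
--         hits.sort(key=lambda t: t[0])
--         out.extend(p for _i, p in hits)
--     return out
-- ===== Notes on version B (the rewrite author's own statement) =====
-- stated objective: alternative
-- what changed: B replaces A's nested all-pairs scan by a sort-then-window search: bump_series1 is presorted (with original positions) by start and by end, each series0 interval reads the '-' candidates off a suffix of the end-sorted list and the '+' hits off a contiguous window of the start-sorted list, and the hits are re-sorted by original position to restore A's output order.
import Mathlib
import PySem

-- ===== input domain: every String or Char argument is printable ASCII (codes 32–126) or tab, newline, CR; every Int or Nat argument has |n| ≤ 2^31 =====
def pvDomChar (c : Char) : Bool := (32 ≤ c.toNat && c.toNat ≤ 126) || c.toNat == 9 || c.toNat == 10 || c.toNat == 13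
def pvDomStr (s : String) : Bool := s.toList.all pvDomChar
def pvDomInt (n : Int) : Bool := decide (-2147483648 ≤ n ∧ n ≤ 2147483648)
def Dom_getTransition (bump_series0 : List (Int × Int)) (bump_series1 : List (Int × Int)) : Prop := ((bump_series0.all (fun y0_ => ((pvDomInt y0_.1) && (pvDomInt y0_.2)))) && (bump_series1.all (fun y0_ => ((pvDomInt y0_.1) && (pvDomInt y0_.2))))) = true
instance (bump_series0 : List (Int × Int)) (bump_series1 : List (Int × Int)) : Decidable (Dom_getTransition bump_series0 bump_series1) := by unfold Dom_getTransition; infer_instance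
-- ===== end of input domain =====

-- B replaces A's nested all-pairs scan by a sort-then-window search (presort bump_series1
-- by start and by end, read candidate windows per series0 interval, re-sort hits by
-- original position); objective: alternative, same worst-case cost.

-- ===== PORT A =====
def getTransition (bump_series0 : List (Int × Int)) (bump_series1 : List (Int × Int)) : List (Int × String) :=
  bump_series0.foldl (fun transitions s0 =>
    bump_series1.foldl (fun transitions s1 =>
      if s0.1 > s1.1 then
        -- direction = '-', diff = start0 - end1, transition_point = start0; then 'if diff < 3: append'
        (if s0.1 - s1.2 < 3 then transitions ++ [(s0.1, "-")] else transitions)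
      else
        -- direction = '+', diff = start1 - end0, transition_point = start1; then 'if diff < 3: append'
        (if s1.1 - s0.2 < 3 then transitions ++ [(s1.1, "+")] else transitions))
      transitions) []

-- ===== PORT B =====
-- Source B's _drop_while/_take_while are exactly List.dropWhile / List.takeWhile
def getTransition_alt (bump_series0 : List (Int × Int)) (bump_series1 : List (Int × Int)) : List (Int × String) :=
  let indexed := PySem.List.enumerate bump_series1
  let byStart := PySem.List.sorted indexed (fun t => t.2.1)
  let byEnd := PySem.List.sorted indexed (fun t => t.2.2)
  bump_series0.foldl (fun out s0 =>
    let tail := byEnd.dropWhile (fun t => t.2.2 ≤ s0.1 - 3)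
    let hits := (tail.filter (fun t => t.2.1 < s0.1)).map (fun t => (t.1, (s0.1, "-")))
    let window := (byStart.dropWhile (fun t => t.2.1 < s0.1)).takeWhile (fun t => t.2.1 - s0.2 < 3)
    let hits := hits ++ window.map (fun t => (t.1, (t.2.1, "+")))
    let hits := PySem.List.sorted hits (fun t => t.1)
    out ++ hits.map (fun t => t.2)) []

-- ===== PRECONDITION & SPEC =====
def Spec_getTransition (bump_series0 : List (Int × Int)) (bump_series1 : List (Int × Int)) (out : List (Int × String)) : Prop := out = getTransition_alt bump_series0 bump_series1
instance (bump_series0 : List (Int × Int)) (bump_series1 : List (Int × Int)) (out : List (Int × String)) : Decidable (Spec_getTransition bump_series0 bump_series1 out) := by unfold Spec_getTransition; infer_instance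

-- ===== CLAIM (what is proved, stated in full; the proofs are below) =====
def Claim_equal_getTransition : Prop := ∀ (bump_series0 : List (Int × Int)) (bump_series1 : List (Int × Int)), Dom_getTransition bump_series0 bump_series1 → Spec_getTransition bump_series0 bump_series1 (getTransition bump_series0 bump_series1)

-- ===== LEMMAS AND PROOFS =====

-- the per-pair hit of A: Option (transition_point, direction)
def hitEmit? (s0 s1 : Int × Int) : Option (Int × String) :=
  if s0.1 > s1.1 then
    (if s0.1 - s1.2 < 3 then some (s0.1, "-") else none)
  else
    (if s1.1 - s0.2 < 3 then some (s1.1, "+") else none)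

-- Bool predicates on an indexed series1 element t : Int × (Int × Int)
def mB (s0 : Int × Int) (t : Int × (Int × Int)) : Bool := t.2.1 < s0.1 && s0.1 - t.2.2 < 3
def pB (s0 : Int × Int) (t : Int × (Int × Int)) : Bool := !(t.2.1 < s0.1) && t.2.1 - s0.2 < 3
def hB (s0 : Int × Int) (t : Int × (Int × Int)) : Bool := mB s0 t || pB s0 t
def emh (s0 : Int × Int) (t : Int × (Int × Int)) : Int × String :=
  if t.2.1 < s0.1 then (s0.1, "-") else (t.2.1, "+")

-- A's inner loop is a filterMap
theorem innerA (s0 : Int × Int) (b1 : List (Int × Int)) (t : List (Int × String)) :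
    b1.foldl (fun transitions s1 =>
      if s0.1 > s1.1 then
        (if s0.1 - s1.2 < 3 then transitions ++ [(s0.1, "-")] else transitions)
      else
        (if s1.1 - s0.2 < 3 then transitions ++ [(s1.1, "+")] else transitions)) t
    = t ++ b1.filterMap (hitEmit? s0) := by
  induction b1 generalizing t with
  | nil => simp
  | cons h tl ih =>
    rw [List.foldl_cons, ih, List.filterMap_cons]
    unfold hitEmit?
    split_ifs <;> simp

theorem getTransition_eq (b0 b1 : List (Int × Int)) :
    getTransition b0 b1 = b0.flatMap (fun s0 => b1.filterMap (hitEmit? s0)) := by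
  unfold getTransition
  calc b0.foldl _ []
      = b0.foldl (fun acc s0 => acc ++ b1.filterMap (hitEmit? s0)) [] := by
        apply PySem.List.foldl_congr_mem
        intro acc s0 _
        exact innerA s0 b1 acc
    _ = _ := by
        simpa using PySem.List.foldl_append_eq_flatMap (fun s0 => b1.filterMap (hitEmit? s0)) b0 []

-- dropWhile / takeWhile on key-sorted lists are filters
theorem dropWhile_le_eq_filter {α : Type} (f : α → Int) (c : Int) (l : List α)
    (h : l.Pairwise (fun a b => f a ≤ f b)) :
    l.dropWhile (fun t => decide (f t ≤ c)) = l.filter (fun t => decide (c < f t)) := by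
  induction l with
  | nil => rfl
  | cons a l ih =>
    rcases List.pairwise_cons.mp h with ⟨ha, hp⟩
    by_cases hc : f a ≤ c
    · simp [hc, not_lt.mpr hc, ih hp]
    · rw [List.dropWhile_cons]
      simp only [hc, decide_false, Bool.false_eq_true, if_false]
      rw [List.filter_cons]
      simp only [not_le.mp hc, decide_true, if_true]
      rw [List.filter_eq_self.mpr]
      intro b hb
      have := ha b hb
      simp; omega

theorem dropWhile_lt_eq_filter {α : Type} (f : α → Int) (c : Int) (l : List α)
    (h : l.Pairwise (fun a b => f a ≤ f b)) :
    l.dropWhile (fun t => decide (f t < c)) = l.filter (fun t => decide (c ≤ f t)) := by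
  induction l with
  | nil => rfl
  | cons a l ih =>
    rcases List.pairwise_cons.mp h with ⟨ha, hp⟩
    by_cases hc : f a < c
    · simp [hc, not_le.mpr hc, ih hp]
    · rw [List.dropWhile_cons]
      simp only [hc, decide_false, Bool.false_eq_true, if_false]
      rw [List.filter_cons]
      simp only [not_lt.mp hc, decide_true, if_true]
      rw [List.filter_eq_self.mpr]
      intro b hb
      have := ha b hb
      simp; omega

theorem takeWhile_lt_eq_filter {α : Type} (f : α → Int) (c : Int) (l : List α)
    (h : l.Pairwise (fun a b => f a ≤ f b)) :
    l.takeWhile (fun t => decide (f t < c)) = l.filter (fun t => decide (f t < c)) := by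
  induction l with
  | nil => rfl
  | cons a l ih =>
    rcases List.pairwise_cons.mp h with ⟨ha, hp⟩
    by_cases hc : f a < c
    · simp [hc, ih hp]
    · rw [List.takeWhile_cons]
      simp only [hc, decide_false, Bool.false_eq_true, if_false]
      rw [List.filter_cons]
      simp only [hc, decide_false, Bool.false_eq_true, if_false]
      rw [Eq.comm, List.filter_eq_nil_iff]
      intro b hb
      have := ha b hb
      simp; omega

-- the hB-filter of the enumeration, mapped through em, is A's row
theorem filter_enumerate_eq_filterMap (s0 : Int × Int) (b1 : List (Int × Int)) (s : Int) :
    ((PySem.List.enumerate b1 s).filter (hB s0)).map (emh s0) = b1.filterMap (hitEmit? s0) := by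
  induction b1 generalizing s with
  | nil => simp [PySem.List.enumerate_nil]
  | cons x xs ih =>
    rw [PySem.List.enumerate_cons, List.filterMap_cons, List.filter_cons]
    by_cases h1 : x.1 < s0.1 <;> by_cases h2 : s0.1 - x.2 < 3 <;>
      by_cases h3 : x.1 - s0.2 < 3 <;>
        simp [hB, mB, pB, hitEmit?, emh, h1, h2, h3, ih, gt_iff_lt]

-- B's row equals A's row
theorem rowB_eq (s0 : Int × Int) (b1 : List (Int × Int)) :
    (PySem.List.sorted
      ((((PySem.List.sorted (PySem.List.enumerate b1) (fun t => t.2.2)).dropWhile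
          (fun t => t.2.2 ≤ s0.1 - 3)).filter (fun t => t.2.1 < s0.1)).map
            (fun t => (t.1, (s0.1, "-")))
        ++ (((PySem.List.sorted (PySem.List.enumerate b1) (fun t => t.2.1)).dropWhile
          (fun t => t.2.1 < s0.1)).takeWhile (fun t => t.2.1 - s0.2 < 3)).map
            (fun t => (t.1, (t.2.1, "+"))))
      (fun t => t.1)).map (fun t => t.2)
    = b1.filterMap (hitEmit? s0) := by
  set e := PySem.List.enumerate b1 with he
  set L := e.filter (hB s0) with hL
  -- the minus part is the mB-filter of the end-sorted list
  have hminus : ((PySem.List.sorted e (fun t => t.2.2)).dropWhile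
      (fun t => t.2.2 ≤ s0.1 - 3)).filter (fun t => t.2.1 < s0.1)
      = (PySem.List.sorted e (fun t => t.2.2)).filter (mB s0) := by
    have hs := PySem.List.sorted_pairwise e (fun t : Int × (Int × Int) => t.2.2)
    simp only [dropWhile_le_eq_filter (fun t : Int × (Int × Int) => t.2.2) (s0.1 - 3)
      (PySem.List.sorted e (fun t => t.2.2)) hs, List.filter_filter]
    apply List.filter_congr
    intro t _
    rw [Bool.eq_iff_iff]
    simp only [mB, Bool.and_eq_true, decide_eq_true_eq]
    omega
  -- the plus part is the pB-filter of the start-sorted list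
  have hplus : ((PySem.List.sorted e (fun t => t.2.1)).dropWhile
      (fun t => t.2.1 < s0.1)).takeWhile (fun t => t.2.1 - s0.2 < 3)
      = (PySem.List.sorted e (fun t => t.2.1)).filter (pB s0) := by
    have hs := PySem.List.sorted_pairwise e (fun t : Int × (Int × Int) => t.2.1)
    simp only [dropWhile_lt_eq_filter (fun t : Int × (Int × Int) => t.2.1) s0.1
      (PySem.List.sorted e (fun t => t.2.1)) hs]
    have hcond : (fun t : Int × (Int × Int) => decide (t.2.1 - s0.2 < 3))
        = (fun t : Int × (Int × Int) => decide (t.2.1 < s0.2 + 3)) := by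
      funext t; simp; omega
    rw [hcond]
    simp only [takeWhile_lt_eq_filter (fun t : Int × (Int × Int) => t.2.1) (s0.2 + 3)
      _ (List.Pairwise.filter _ hs), List.filter_filter]
    apply List.filter_congr
    intro t _
    rw [Bool.eq_iff_iff]
    simp only [pB, Bool.and_eq_true, Bool.not_eq_true', decide_eq_true_eq,
      decide_eq_false_iff_not]
    omega
  rw [hminus, hplus]
  -- the sorted hits are exactly the hB-filter of the enumeration, mapped through (idx, emh)
  have hm : ((PySem.List.sorted e (fun t => t.2.2)).filter (mB s0)).Perm (L.filter (mB s0)) := by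
    have h1 : e.filter (mB s0) = L.filter (mB s0) := by
      rw [hL, List.filter_filter]
      apply List.filter_congr
      intro t _
      rw [Bool.eq_iff_iff]
      simp only [hB, mB, pB, Bool.and_eq_true, Bool.or_eq_true, Bool.not_eq_true',
        decide_eq_true_eq, decide_eq_false_iff_not]
      omega
    exact h1 ▸ (PySem.List.sorted_perm e (fun t => t.2.2) false).filter _
  have hp : ((PySem.List.sorted e (fun t => t.2.1)).filter (pB s0)).Perm
      (L.filter (fun t => !(mB s0 t))) := by
    have h1 : e.filter (pB s0) = L.filter (fun t => !(mB s0 t)) := by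
      rw [hL, List.filter_filter]
      apply List.filter_congr
      intro t _
      cases hmb : mB s0 t with
      | false => simp [hB, hmb]
      | true =>
        have h1 : t.2.1 < s0.1 := by
          simp only [mB, Bool.and_eq_true, decide_eq_true_eq] at hmb
          exact hmb.1
        simp [pB, h1]
    exact h1 ▸ (PySem.List.sorted_perm e (fun t => t.2.1) false).filter _
  have em1 : (L.filter (mB s0)).map (fun t => ((t.1 : Int), ((s0.1 : Int), ("-" : String))))
      = (L.filter (mB s0)).map (fun t => (t.1, emh s0 t)) := by
    apply List.map_congr_left
    intro t ht
    have := List.of_mem_filter ht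
    simp only [mB, Bool.and_eq_true, decide_eq_true_eq] at this
    simp [emh, this.1]
  have em2 : (L.filter (fun t => !(mB s0 t))).map (fun t => ((t.1 : Int), (t.2.1, ("+" : String))))
      = (L.filter (fun t => !(mB s0 t))).map (fun t => (t.1, emh s0 t)) := by
    apply List.map_congr_left
    intro t ht
    have hLt := List.mem_filter.mp ht
    have hhB : hB s0 t = true := List.of_mem_filter (hL ▸ hLt.1)
    have hnm := hLt.2
    have hmbf : mB s0 t = false := by
      cases h : mB s0 t
      · rfl
      · rw [h] at hnm; simp at hnm
    have hpB : pB s0 t = true := by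
      have h2 := hhB
      simp only [hB, hmbf, Bool.false_or] at h2
      exact h2
    have hge : ¬ (t.2.1 < s0.1) := by
      simp only [pB, Bool.and_eq_true, Bool.not_eq_true', decide_eq_true_eq,
        decide_eq_false_iff_not] at hpB
      exact hpB.1
    simp [emh, hge]
  have hperm : (((PySem.List.sorted e (fun t => t.2.2)).filter (mB s0)).map
        (fun t => (t.1, (s0.1, "-")))
        ++ ((PySem.List.sorted e (fun t => t.2.1)).filter (pB s0)).map
        (fun t => (t.1, (t.2.1, "+")))).Perm
      (L.map (fun t => (t.1, emh s0 t))) := by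
    calc ((PySem.List.sorted e (fun t => t.2.2)).filter (mB s0)).map (fun t => (t.1, (s0.1, "-")))
            ++ ((PySem.List.sorted e (fun t => t.2.1)).filter (pB s0)).map (fun t => (t.1, (t.2.1, "+")))
        |>.Perm ((L.filter (mB s0)).map (fun t => (t.1, (s0.1, "-")))
            ++ (L.filter (fun t => !(mB s0 t))).map (fun t => (t.1, (t.2.1, "+")))) :=
          (hm.map _).append (hp.map _)
      _ = ((L.filter (mB s0)) ++ (L.filter (fun t => !(mB s0 t)))).map (fun t => (t.1, emh s0 t)) := by
          rw [List.map_append, em1, em2]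
      _ |>.Perm (L.map (fun t => (t.1, emh s0 t))) := (List.filter_append_perm (mB s0) L).map _
  have hpair : (L.map (fun t => (t.1, emh s0 t))).Pairwise
      (fun a b : Int × (Int × String) => a.1 < b.1) := by
    rw [List.pairwise_map]
    exact List.Pairwise.filter _ (PySem.List.pairwise_lt_enumerate b1 0)
  rw [PySem.List.sorted_eq_of_perm_of_pairwise_lt _ _ _ hperm.symm hpair]
  rw [List.map_map]
  have hcomp : ((fun t : Int × (Int × String) => t.2) ∘ (fun t : Int × (Int × Int) => (t.1, emh s0 t)))
      = emh s0 := rfl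
  rw [hcomp]
  exact filter_enumerate_eq_filterMap s0 b1 0

theorem getTransition_alt_eq (b0 b1 : List (Int × Int)) :
    getTransition_alt b0 b1 = b0.flatMap (fun s0 => b1.filterMap (hitEmit? s0)) := by
  unfold getTransition_alt
  simp only []
  calc b0.foldl _ []
      = b0.foldl (fun acc s0 => acc ++ b1.filterMap (hitEmit? s0)) [] := by
        apply PySem.List.foldl_congr_mem
        intro acc s0 _
        rw [rowB_eq s0 b1]
    _ = _ := by
        simpa using PySem.List.foldl_append_eq_flatMap (fun s0 => b1.filterMap (hitEmit? s0)) b0 []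

-- ===== VERDICT (by name: the statement is the Claim_ definition above) =====
theorem getTransition_spec : Claim_equal_getTransition := by
  intro b0 b1 _
  unfold Spec_getTransition
  rw [getTransition_eq, getTransition_alt_eq]
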